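-- pv_equiv track=rewrite | github.com/rcprobe/perception-triage | src/triage/confusion.py | merge_confusion_matrices
-- ===== SOURCE A (Python) =====
-- from collections import defaultdict
-- from typing import DefaultDict, Dict, Iterable, List, Sequence
--
-- def merge_confusion_matrices(
--     matrices: Iterable[Dict[str, Dict[str, int]]],
-- ) -> Dict[str, Dict[str, int]]:
--     """Aggregate multiple per-frame confusion matrices into one matrix."""
--     merged: DefaultDict[str, DefaultDict[str, int]] = defaultdict(lambda: defaultdict(int))
--
--     for matrix in matrices:
--         for gt_class, pred_counts in matrix.items():
--             for pred_class, count in pred_counts.items():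
--                 merged[gt_class][pred_class] += count
--
--     return {gt: dict(preds) for gt, preds in merged.items()}
-- ===== SOURCE B (Python) =====
-- def merge_confusion_matrices(matrices):
--     """Flatten to (gt, pred, count) triples, then rebuild the nested result by grouping."""
--     triples = [(gt, pred, count)
--                for matrix in matrices
--                for gt, preds in matrix.items()
--                for pred, count in preds.items()]
--     groups = {}
--     for gt, pred, count in triples:
--         groups.setdefault(gt, []).append((pred, count))
--     result = {}
--     for gt, row in groups.items():
--         sums = {}
--         for pred, count in row:
--             sums[pred] = sums.get(pred, 0) + count
--         result[gt] = sums
--     return result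
-- ===== Notes on version B (the rewrite author's own statement) =====
-- stated objective: alternative
-- what changed: A accumulates into a nested defaultdict while iterating the matrices; B first flattens everything to a flat list of (gt, pred, count) triples, then rebuilds the nested result in separate regrouping passes (group triples by gt, then sum each group per pred).
import Mathlib
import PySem

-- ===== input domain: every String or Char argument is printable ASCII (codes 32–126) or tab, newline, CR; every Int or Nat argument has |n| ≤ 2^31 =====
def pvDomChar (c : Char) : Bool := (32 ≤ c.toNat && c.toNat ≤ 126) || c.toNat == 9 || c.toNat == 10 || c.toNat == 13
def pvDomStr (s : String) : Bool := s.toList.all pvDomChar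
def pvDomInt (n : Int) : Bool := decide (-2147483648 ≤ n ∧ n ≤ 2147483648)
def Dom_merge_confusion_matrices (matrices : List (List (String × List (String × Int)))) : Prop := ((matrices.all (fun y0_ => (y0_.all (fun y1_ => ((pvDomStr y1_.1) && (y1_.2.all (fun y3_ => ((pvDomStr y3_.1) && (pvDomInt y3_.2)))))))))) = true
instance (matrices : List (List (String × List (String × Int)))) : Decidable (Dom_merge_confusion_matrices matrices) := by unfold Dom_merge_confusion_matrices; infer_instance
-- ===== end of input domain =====

-- B replaces A's incremental nested-defaultdict accumulation by a flatten-then-regroup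
-- decomposition (triples list, group-by-gt pass, per-group summing pass); objective: alternative.

-- ===== PORT A =====
def merge_confusion_matrices (matrices : List (List (String × List (String × Int)))) : List (String × List (String × Int)) :=
  -- merged[gt][pred] += count over nested defaultdicts
  let merged : PySem.Dict String (PySem.Dict String Int) :=
    matrices.foldl (fun merged matrix =>
      matrix.foldl (fun merged gp =>
        gp.2.foldl (fun merged pc =>
          merged.modify gp.1 PySem.Dict.empty (fun inner => inner.modify pc.1 0 (· + pc.2))) merged) merged)
      PySem.Dict.empty
  -- {gt: dict(preds) for gt, preds in merged.items()}
  merged.items.map (fun p => (p.1, p.2.items))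

-- ===== PORT B =====
def merge_confusion_matrices_alt (matrices : List (List (String × List (String × Int)))) : List (String × List (String × Int)) :=
  let triples : List (String × String × Int) :=
    matrices.flatMap (fun matrix => matrix.flatMap (fun gp => gp.2.map (fun pc => (gp.1, pc.1, pc.2))))
  -- groups.setdefault(gt, []).append((pred, count))
  let groups : PySem.Dict String (List (String × Int)) :=
    triples.foldl (fun groups t => groups.modify t.1 [] (· ++ [(t.2.1, t.2.2)])) PySem.Dict.empty
  -- for gt, row in groups.items(): sums[pred] = sums.get(pred, 0) + count; result[gt] = sums
  let result : PySem.Dict String (PySem.Dict String Int) :=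
    groups.items.foldl (fun result kv =>
      result.insert kv.1
        (kv.2.foldl (fun sums pc => sums.modify pc.1 0 (· + pc.2)) PySem.Dict.empty))
      PySem.Dict.empty
  result.items.map (fun p => (p.1, p.2.items))

-- ===== PRECONDITION & SPEC =====
def Spec_merge_confusion_matrices (matrices : List (List (String × List (String × Int)))) (out : List (String × List (String × Int))) : Prop := out = merge_confusion_matrices_alt matrices
instance (matrices : List (List (String × List (String × Int)))) (out : List (String × List (String × Int))) : Decidable (Spec_merge_confusion_matrices matrices out) := by unfold Spec_merge_confusion_matrices; infer_instance

-- ===== CLAIM (what is proved, stated in full; the proofs are below) =====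
def Claim_equal_merge_confusion_matrices : Prop := ∀ (matrices : List (List (String × List (String × Int)))), Dom_merge_confusion_matrices matrices → Spec_merge_confusion_matrices matrices (merge_confusion_matrices matrices)

-- ===== LEMMAS AND PROOFS =====

-- the single accumulation step of A, seen per flattened triple (gt, pred, count)
def pvNStep (d : PySem.Dict String (PySem.Dict String Int)) (t : String × String × Int) : PySem.Dict String (PySem.Dict String Int) :=
  d.modify t.1 PySem.Dict.empty (fun inner => inner.modify t.2.1 0 (· + t.2.2))

def pvIStep (i : PySem.Dict String Int) (t : String × String × Int) : PySem.Dict String Int :=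
  i.modify t.2.1 0 (· + t.2.2)

-- A's nested loops are the fold of pvNStep over the flattened triple list
lemma pvA_flatten (matrices : List (List (String × List (String × Int)))) (acc : PySem.Dict String (PySem.Dict String Int)) :
    matrices.foldl (fun merged matrix =>
      matrix.foldl (fun merged gp =>
        gp.2.foldl (fun merged pc =>
          merged.modify gp.1 PySem.Dict.empty (fun inner => inner.modify pc.1 0 (· + pc.2))) merged) merged) acc
    = (matrices.flatMap (fun matrix => matrix.flatMap (fun gp => gp.2.map (fun pc => (gp.1, pc.1, pc.2))))).foldl pvNStep acc := by
  simp only [List.foldl_flatMap, List.foldl_map, pvNStep]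

-- outer lookup of the flat fold: the inner fold over the matching rows
lemma pvGetD_outer (L : List (String × String × Int)) (g : String) (acc : PySem.Dict String (PySem.Dict String Int)) :
    (L.foldl pvNStep acc).getD g PySem.Dict.empty
      = (L.filter (fun t => t.1 == g)).foldl pvIStep (acc.getD g PySem.Dict.empty) := by
  induction L generalizing acc with
  | nil => simp
  | cons t L ih =>
    simp only [List.foldl_cons, ih, List.filter_cons]
    by_cases h : t.1 = g
    · simp [pvNStep, pvIStep, h]
    · simp [pvNStep, PySem.Dict.getD_modify, h, Ne.symm h]

-- a dict with nodup keys is its key list paired with its lookups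
lemma pvItems_eq_keys_map {κ ν : Type} [BEq κ] [LawfulBEq κ] (d : PySem.Dict κ ν) (dflt : ν) (h : d.keys.Nodup) :
    d.items = d.keys.map (fun k => (k, d.getD k dflt)) := by
  have hk : d.keys = d.items.map (·.1) := rfl
  rw [hk, List.map_map]
  conv_lhs => rw [← List.map_id d.items]
  apply List.map_congr_left
  intro kv hkv
  have hv : d.getD kv.1 dflt = kv.2 :=
    PySem.Dict.getD_of_mem_items d (show (kv.1, kv.2) ∈ d.items by simpa using hkv) h dflt
  simp [Function.comp, hv]

-- ===== VERDICT (by name: the statement is the Claim_ definition above) =====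
theorem merge_confusion_matrices_spec : Claim_equal_merge_confusion_matrices := by
  intro matrices _
  unfold Spec_merge_confusion_matrices merge_confusion_matrices merge_confusion_matrices_alt
  dsimp only
  rw [pvA_flatten]
  set L := matrices.flatMap (fun matrix => matrix.flatMap (fun gp => gp.2.map (fun pc => (gp.1, pc.1, pc.2)))) with hL
  set N := L.foldl pvNStep PySem.Dict.empty with hN
  -- characterize A's accumulated dict
  have hkeys : N.keys = PySem.Set.ofList (L.map (·.1)) := by
    rw [hN]
    show (L.foldl (fun d t => d.modify t.1 PySem.Dict.empty (fun inner => inner.modify t.2.1 0 (· + t.2.2))) PySem.Dict.empty).keys = _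
    rw [PySem.Dict.keys_foldl_modify_key]
    simp [PySem.Set.update_nil_left]
  have hnodup : N.keys.Nodup := by
    rw [hN]
    exact PySem.Dict.nodup_keys_foldl_modify_key _ _ _ _ _ (by simp)
  rw [pvItems_eq_keys_map N PySem.Dict.empty hnodup, hkeys]
  -- characterize B's grouping dict
  set G := L.foldl (fun groups t => groups.modify t.1 [] (· ++ [(t.2.1, t.2.2)])) (PySem.Dict.empty : PySem.Dict String (List (String × Int))) with hG
  have hGmap : G = (L.map (fun t => (t.1, (t.2.1, t.2.2)))).foldl (fun d p => d.modify p.1 [] (· ++ [p.2])) PySem.Dict.empty := by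
    rw [hG, List.foldl_map]
  have hGkeys : G.keys = PySem.Set.ofList (L.map (·.1)) := by
    rw [hGmap, PySem.Dict.keys_foldl_modify_key]
    simp [PySem.Set.update_nil_left]
  have hGnodup : G.keys.Nodup := by
    rw [hGmap]
    exact PySem.Dict.nodup_keys_foldl_modify_key _ _ _ _ _ (by simp)
  have hGget : ∀ g : String, G.getD g [] = (L.filter (fun t => t.1 == g)).map (fun t => (t.2.1, t.2.2)) := by
    intro g
    rw [hGmap, PySem.Dict.getD_foldl_modify_append, List.filter_map]
    simp only [List.map_map]
    rfl
  -- B's second pass appends one fresh key per group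
  rw [PySem.Dict.items_foldl_insert_fresh G.items (fun kv => kv.1)
        (fun kv => kv.2.foldl (fun sums pc => sums.modify pc.1 0 (· + pc.2)) PySem.Dict.empty)
        PySem.Dict.empty
        (by intro a _; simp)
        (by simpa using hGnodup)]
  rw [show (PySem.Dict.empty : PySem.Dict String (PySem.Dict String Int)).items = [] from rfl, List.nil_append]
  rw [pvItems_eq_keys_map G [] hGnodup, hGkeys]
  simp only [List.map_map]
  apply List.map_congr_left
  intro g _
  simp only [Function.comp]
  refine congrArg (fun w => (g, w)) ?_
  refine congrArg (fun d => PySem.Dict.items d) ?_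
  -- A's accumulated row dict equals B's per-group summing dict
  rw [hN, pvGetD_outer, hGget, List.foldl_map]
  rfl
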